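-- pv_equiv track=rewrite | github.com/uob-ir-g10/collab-slam | src/astar/astar.py | get_costmap
-- ===== SOURCE A (Python) =====
-- def row(index, width):
--     return int(index / width)
--
-- def column(index, width):
--     return int(index % width)
--
-- def get_2D(coord, width):
--     return row(coord, width), column(coord, width)
--
-- def get_1D(row, col, width):
--     result = (int(row) * width) + col
--     return result
--
-- def get_surrounding(coord, width):
--     coords = []
--     coord_2D = get_2D(coord, width)
--     for i in range(-1, 2):
--         for j in range(-1, 2):
--             if i == 0 and j == 0:
--                 continue
--             else:
--                 row, col = coord_2D[0] + i, coord_2D[1] + j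
--                 if row < 0 or row >= width:
--                     continue
--                 if col < 0 or col >= width:
--                     continue
--                 coord_1D = get_1D(row, col, width)
--                 coords.append(coord_1D)
--     return coords
--
-- def get_costmap(cell, width, layers):
--     current_layer = get_surrounding(cell, width)
--     if layers == 1:
--         return current_layer
--     else:
--         all_coords = []
--         for coord in current_layer:
--             all_coords += get_costmap(coord, width, layers-1)
--         return all_coords
-- ===== SOURCE B (Python) =====
-- def row(index, width):
--     return int(index / width)
--
-- def column(index, width):
--     return int(index % width)
--
-- def get_2D(coord, width):
--     return row(coord, width), column(coord, width)
--
-- def get_1D(row, col, width):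
--     result = (int(row) * width) + col
--     return result
--
-- def get_surrounding(coord, width):
--     coords = []
--     coord_2D = get_2D(coord, width)
--     for i in range(-1, 2):
--         for j in range(-1, 2):
--             if i == 0 and j == 0:
--                 continue
--             else:
--                 row, col = coord_2D[0] + i, coord_2D[1] + j
--                 if row < 0 or row >= width:
--                     continue
--                 if col < 0 or col >= width:
--                     continue
--                 coord_1D = get_1D(row, col, width)
--                 coords.append(coord_1D)
--     return coords
--
-- def get_costmap(cell, width, layers):
--     frontier = [cell]
--     remaining = layers
--     while remaining > 0 and frontier:
--         next_frontier = []
--         for c in frontier: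
--             next_frontier += get_surrounding(c, width)
--         frontier = next_frontier
--         remaining -= 1
--     return frontier
-- ===== Notes on version B (the rewrite author's own statement) =====
-- stated objective: alternative
-- what changed: Replaces the DFS recursion over layers (concatenating recursive results per neighbour) with an iterative level-by-level frontier expansion: start from [cell] and expand the whole frontier layers times.
-- outside the precondition, e.g. on get_costmap(0, -3, 0): A returns [], B returns [0]; on get_costmap(5, 1, 0): A returns [], B returns [5]
import Mathlib
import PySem

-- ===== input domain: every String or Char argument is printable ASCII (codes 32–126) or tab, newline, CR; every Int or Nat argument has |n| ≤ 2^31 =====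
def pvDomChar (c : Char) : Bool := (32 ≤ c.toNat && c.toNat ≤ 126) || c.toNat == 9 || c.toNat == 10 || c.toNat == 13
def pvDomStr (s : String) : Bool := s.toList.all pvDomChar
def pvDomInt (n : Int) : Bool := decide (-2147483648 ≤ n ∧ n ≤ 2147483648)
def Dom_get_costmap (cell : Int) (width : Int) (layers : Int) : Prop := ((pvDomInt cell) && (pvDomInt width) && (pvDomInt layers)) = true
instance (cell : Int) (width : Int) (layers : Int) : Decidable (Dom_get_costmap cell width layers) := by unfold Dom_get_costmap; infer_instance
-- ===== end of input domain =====

-- B replaces A's DFS recursion over layers by an iterative level-by-level frontier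
-- expansion; equivalence is proved for width ≠ 0 and layers ≥ 1 (see Pre_ below).

-- ===== PORT A =====
-- int(coord / width): float division then truncation toward zero. For |coord|, |width| ≤ 2^31
-- (the Dom bound) the rounded quotient can never cross or reach a different integer than the
-- exact quotient, so this equals exact truncated division Int.tdiv; exact on Dom with width ≠ 0.
def pyRowA (index : Int) (width : Int) : Int := Int.tdiv index width

-- shared helper (identical same-module helper in Source A and Source B)
def get_surrounding (coord : Int) (width : Int) : List Int :=
  let r := pyRowA coord width
  let c := PySem.Int.mod coord width
  (PySem.List.pyRange (-1) 2 1).foldl (fun coords i =>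
    (PySem.List.pyRange (-1) 2 1).foldl (fun coords j =>
      if i = 0 ∧ j = 0 then coords
      else
        let row := r + i
        let col := c + j
        if row < 0 ∨ row ≥ width then coords
        else if col < 0 ∨ col ≥ width then coords
        else coords ++ [row * width + col]) coords) []

-- A's recursion, on fuel layers.toNat. Fuel 0 (layers ≤ 0) is returned as []: Python reaches a
-- normal return there only through the empty-frontier loop (value []); with a nonempty frontier
-- it raises RecursionError, which Pre_ excludes.
def get_costmap_go (width : Int) : Nat → Int → List Int
  | 0, _ => []
  | n+1, cell =>
    let current := get_surrounding cell width
    if n + 1 = 1 then current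
    else current.foldl (fun all_coords coord => all_coords ++ get_costmap_go width n coord) []

def get_costmap (cell : Int) (width : Int) (layers : Int) : List Int :=
  get_costmap_go width layers.toNat cell

-- ===== PORT B =====
def expand_frontier (frontier : List Int) (width : Int) : List Int :=
  frontier.foldl (fun next_frontier c => next_frontier ++ get_surrounding c width) []

-- the while loop 'remaining > 0 and frontier', on fuel remaining.toNat (remaining > 0 ↔ fuel > 0)
def alt_go (width : Int) : Nat → List Int → List Int
  | 0, frontier => frontier
  | n+1, frontier =>
    if frontier = [] then frontier
    else alt_go width n (expand_frontier frontier width)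

def get_costmap_alt (cell : Int) (width : Int) (layers : Int) : List Int :=
  alt_go width layers.toNat [cell]

-- ===== PRECONDITION & SPEC =====
-- Pre_ excludes width = 0, where A raises ZeroDivisionError, and layers ≤ 0, a layer count
-- outside the function's purpose on which A raises RecursionError except when the first frontier
-- is empty, where it happens to return [] while B's loop returns [cell] — an unspecified corner
-- where neither value is the intended one.
def Pre_get_costmap (cell : Int) (width : Int) (layers : Int) : Prop := width ≠ 0 ∧ 1 ≤ layers
instance (cell : Int) (width : Int) (layers : Int) : Decidable (Pre_get_costmap cell width layers) := by unfold Pre_get_costmap; infer_instance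
def pvWitness_get_costmap : Int × Int × Int := (4, 3, 2)

def Spec_get_costmap (cell : Int) (width : Int) (layers : Int) (out : List Int) : Prop := out = get_costmap_alt cell width layers
instance (cell : Int) (width : Int) (layers : Int) (out : List Int) : Decidable (Spec_get_costmap cell width layers out) := by unfold Spec_get_costmap; infer_instance

-- ===== CLAIM (what is proved, stated in full; the proofs are below) =====
def Claim_equal_get_costmap : Prop := ∀ (cell : Int) (width : Int) (layers : Int), Dom_get_costmap cell width layers → Pre_get_costmap cell width layers → Spec_get_costmap cell width layers (get_costmap cell width layers)

-- ===== LEMMAS AND PROOFS =====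

theorem expand_eq_flatMap (width : Int) (l : List Int) :
    expand_frontier l width = l.flatMap (fun c => get_surrounding c width) := by
  unfold expand_frontier
  suffices h : ∀ (l : List Int) (init : List Int),
      l.foldl (fun acc c => acc ++ get_surrounding c width) init
        = init ++ l.flatMap (fun c => get_surrounding c width) by
    simpa using h l []
  intro l
  induction l with
  | nil => intro init; simp
  | cons x t ih => intro init; simp [List.foldl_cons, ih, List.append_assoc]

theorem expand_append (width : Int) (a b : List Int) :
    expand_frontier (a ++ b) width = expand_frontier a width ++ expand_frontier b width := by
  simp [expand_eq_flatMap]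

theorem expand_iter_append (width : Int) (n : Nat) (a b : List Int) :
    (fun l => expand_frontier l width)^[n] (a ++ b)
      = (fun l => expand_frontier l width)^[n] a ++ (fun l => expand_frontier l width)^[n] b := by
  induction n generalizing a b with
  | zero => simp
  | succ n ih => simp [Function.iterate_succ_apply, expand_append, ih]

theorem expand_iter_nil (width : Int) (n : Nat) :
    (fun l => expand_frontier l width)^[n] ([] : List Int) = [] := by
  induction n with
  | zero => rfl
  | succ n ih =>
    rw [Function.iterate_succ_apply, show expand_frontier ([] : List Int) width = [] from by
      simp [expand_eq_flatMap], ih]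

theorem expand_iter_flatMap (width : Int) (n : Nat) (l : List Int) (g : Int → List Int) :
    (fun l => expand_frontier l width)^[n] (l.flatMap g)
      = l.flatMap (fun c => (fun l => expand_frontier l width)^[n] (g c)) := by
  induction l with
  | nil => simp [expand_iter_nil]
  | cons x t ih => simp [List.flatMap_cons, expand_iter_append, ih]

theorem go_succ (width : Int) (n : Nat) (cell : Int) :
    get_costmap_go width (n + 1) cell
      = (fun l => expand_frontier l width)^[n] (get_surrounding cell width) := by
  induction n generalizing cell with
  | zero => simp [get_costmap_go]
  | succ n ih =>
    have hfold : ∀ (cur : List Int),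
        cur.foldl (fun acc coord => acc ++ get_costmap_go width (n + 1) coord) []
          = cur.flatMap (fun coord => get_costmap_go width (n + 1) coord) := by
      intro cur
      suffices h : ∀ (cur init : List Int),
          cur.foldl (fun acc coord => acc ++ get_costmap_go width (n + 1) coord) init
            = init ++ cur.flatMap (fun coord => get_costmap_go width (n + 1) coord) by
        simpa using h cur []
      intro cur
      induction cur with
      | nil => intro init; simp
      | cons x t ih2 => intro init; simp [List.foldl_cons, ih2, List.append_assoc]
    show (let current := get_surrounding cell width;
      if n + 1 + 1 = 1 then current
      else current.foldl (fun acc coord => acc ++ get_costmap_go width (n + 1) coord) []) = _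
    simp only [if_neg (by omega : ¬ n + 1 + 1 = 1)]
    rw [hfold]
    calc (get_surrounding cell width).flatMap (fun coord => get_costmap_go width (n + 1) coord)
        = (get_surrounding cell width).flatMap
            (fun coord => (fun l => expand_frontier l width)^[n] (get_surrounding coord width)) := by
          simp only [ih]
      _ = (fun l => expand_frontier l width)^[n]
            ((get_surrounding cell width).flatMap (fun coord => get_surrounding coord width)) := by
          rw [expand_iter_flatMap]
      _ = (fun l => expand_frontier l width)^[n] (expand_frontier (get_surrounding cell width) width) := by
          rw [expand_eq_flatMap]
      _ = (fun l => expand_frontier l width)^[n + 1] (get_surrounding cell width) := by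
          rw [Function.iterate_succ_apply]

theorem alt_go_eq_iterate (width : Int) (n : Nat) (l : List Int) :
    alt_go width n l = (fun l => expand_frontier l width)^[n] l := by
  induction n generalizing l with
  | zero => rfl
  | succ n ih =>
    show (if l = [] then l else alt_go width n (expand_frontier l width)) = _
    split_ifs with h
    · subst h; rw [expand_iter_nil]
    · rw [ih, Function.iterate_succ_apply]

theorem alt_eq_iterate (cell width layers : Int) :
    get_costmap_alt cell width layers
      = (fun l => expand_frontier l width)^[layers.toNat] [cell] := by
  unfold get_costmap_alt; rw [alt_go_eq_iterate]

theorem expand_singleton (width c : Int) :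
    expand_frontier [c] width = get_surrounding c width := by
  simp [expand_eq_flatMap]

-- ===== VERDICT (by name: the statement is the Claim_ definition above) =====
theorem get_costmap_spec : Claim_equal_get_costmap := by
  intro cell width layers _ hpre
  unfold Spec_get_costmap
  obtain ⟨-, hl⟩ := hpre
  have hm : layers.toNat = (layers.toNat - 1) + 1 := by omega
  rw [alt_eq_iterate]
  unfold get_costmap
  rw [hm, go_succ, Function.iterate_succ_apply, expand_singleton]
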